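-- pv_equiv track=rewrite | github.com/rt671/FuzzBuzz | Main/fuzzygeneration.py | addFuzzy
-- ===== SOURCE A (Python) =====
-- def addFuzzy(keyword, d):
--   # Initialize the fuzzy keyword set with the given keyword
--   fuzzy_keywords = {keyword}
--
--   # If the edit distance is greater than 0, generate the fuzzy keyword set for a distance of d-1
--   if d > 0:
--     prev_keywords = addFuzzy(keyword, d-1)
--
--     # For each keyword in the previous set, generate new keywords by inserting or replacing characters
--     for prev_keyword in prev_keywords:
--       for i in range(len(prev_keyword)+1):
--         # Insert a ? character at position i
--         new_keyword = prev_keyword[:i] + "?" + prev_keyword[i:]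
--         fuzzy_keywords.add(new_keyword)
--
--         # Replace the i-th character with a ? character
--         if i < len(prev_keyword):
--           new_keyword = prev_keyword[:i] + "?" + prev_keyword[i+1:]
--           fuzzy_keywords.add(new_keyword)
--
--   # Return the generated fuzzy keyword set
--   return fuzzy_keywords
-- ===== SOURCE B (Python) =====
-- def addFuzzy(keyword, d):
--   current = {keyword}
--   while d > 0:
--     d = d - 1
--     new_set = {keyword}
--     for s in current:
--       for i in range(len(s) + 1):
--         new_set.add(s[:i] + "?" + s[i:])
--         if i < len(s):
--           new_set.add(s[:i] + "?" + s[i+1:])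
--     current = new_set
--   return current
-- ===== Notes on version B (the rewrite author's own statement) =====
-- stated objective: simpler
-- what changed: Replaces the d-deep recursion (which rebuilds each smaller level on the call stack) with a single iterative while-loop that keeps one working set and expands it d times; Pre_ excludes d >= 1000, where A's recursion depth exceeds CPython's recursion limit and raises RecursionError while B's loop does not recurse.
import Mathlib
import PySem

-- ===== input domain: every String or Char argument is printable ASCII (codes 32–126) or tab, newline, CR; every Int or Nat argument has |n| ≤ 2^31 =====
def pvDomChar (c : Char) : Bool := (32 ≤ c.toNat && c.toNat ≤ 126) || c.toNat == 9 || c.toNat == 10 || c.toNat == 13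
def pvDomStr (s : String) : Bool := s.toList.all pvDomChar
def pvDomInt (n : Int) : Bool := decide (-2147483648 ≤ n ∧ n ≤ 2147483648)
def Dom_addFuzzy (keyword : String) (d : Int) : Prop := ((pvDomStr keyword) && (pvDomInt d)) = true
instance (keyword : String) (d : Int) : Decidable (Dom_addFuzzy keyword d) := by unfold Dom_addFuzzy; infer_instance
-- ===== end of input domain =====

-- B replaces A's d-deep recursion with a single iterative while-loop over one working set (objective: simpler).
-- Both Pythons return a set; its hash iteration order is not modelled — the ports keep insertion order and agree on it.

-- ===== PORT A =====
-- A, step for step: fuzzy = {keyword}; if d > 0, recurse on d-1, then for each prev keyword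
-- and each i in range(len+1) add the '?'-insertion and (if i < len) the '?'-replacement.
def addFuzzy (keyword : String) (d : Int) : List String :=
  let fuzzy_keywords : PySem.Set String := PySem.Set.ofList [keyword]
  if d > 0 then
    let prev_keywords := addFuzzy keyword (d - 1)
    prev_keywords.foldl (fun fz prev_keyword =>
      (PySem.List.pyRange 0 (PySem.Str.len prev_keyword + 1) 1).foldl (fun fz i =>
        -- prev_keyword[:i] + "?" + prev_keyword[i:]  (exact on code points)
        let fz := PySem.Set.add fz (String.ofList
          (PySem.List.slice prev_keyword.toList none (some i) ++ ['?'] ++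
           PySem.List.slice prev_keyword.toList (some i) none))
        if i < PySem.Str.len prev_keyword then
          -- prev_keyword[:i] + "?" + prev_keyword[i+1:]
          PySem.Set.add fz (String.ofList
            (PySem.List.slice prev_keyword.toList none (some i) ++ ['?'] ++
             PySem.List.slice prev_keyword.toList (some (i + 1)) none))
        else fz) fz) fuzzy_keywords
  else fuzzy_keywords
termination_by d.toNat
decreasing_by omega

-- ===== PORT B =====
-- One loop pass of Source B: new_set = {keyword}; add every insertion/replacement of each s in current.
def fuzzEdits (keyword : String) (current : PySem.Set String) : PySem.Set String :=
  current.foldl (fun ns s =>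
    (PySem.List.pyRange 0 (PySem.Str.len s + 1) 1).foldl (fun ns i =>
      -- s[:i] + "?" + s[i:]
      let ns := PySem.Set.add ns (String.ofList
        (PySem.List.slice s.toList none (some i) ++ ['?'] ++
         PySem.List.slice s.toList (some i) none))
      if i < PySem.Str.len s then
        -- s[:i] + "?" + s[i+1:]
        PySem.Set.add ns (String.ofList
          (PySem.List.slice s.toList none (some i) ++ ['?'] ++
           PySem.List.slice s.toList (some (i + 1)) none))
      else ns) ns) (PySem.Set.ofList [keyword])

-- Source B's 'while d > 0: d = d - 1; current = <one pass>' as tail recursion on the same state.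
def fuzzLoop (keyword : String) (d : Int) (current : PySem.Set String) : List String :=
  if d > 0 then fuzzLoop keyword (d - 1) (fuzzEdits keyword current) else current
termination_by d.toNat
decreasing_by omega

def addFuzzy_alt (keyword : String) (d : Int) : List String :=
  fuzzLoop keyword d (PySem.Set.ofList [keyword])

-- ===== PRECONDITION & SPEC =====
-- Pre_ excludes d ≥ 1000: there A's d-deep recursion exceeds CPython's recursion limit and raises
-- RecursionError, so A returns no value; B's iterative loop does not recurse (this is the only exclusion).
def Pre_addFuzzy (_keyword : String) (d : Int) : Prop := d < 1000
instance (keyword : String) (d : Int) : Decidable (Pre_addFuzzy keyword d) := by unfold Pre_addFuzzy; infer_instance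

def pvWitness_addFuzzy : String × Int := ("ab", 2)

def Spec_addFuzzy (keyword : String) (d : Int) (out : List String) : Prop := out = addFuzzy_alt keyword d
instance (keyword : String) (d : Int) (out : List String) : Decidable (Spec_addFuzzy keyword d out) := by unfold Spec_addFuzzy; infer_instance

-- ===== CLAIM (what is proved, stated in full; the proofs are below) =====
def Claim_equal_addFuzzy : Prop := ∀ (keyword : String) (d : Int), Dom_addFuzzy keyword d → Pre_addFuzzy keyword d → Spec_addFuzzy keyword d (addFuzzy keyword d)

-- ===== LEMMAS AND PROOFS =====

-- A's 'd > 0' branch is exactly one Source B pass applied to the recursive result.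
theorem addFuzzy_pos (keyword : String) (d : Int) (h : d > 0) :
    addFuzzy keyword d = fuzzEdits keyword (addFuzzy keyword (d - 1)) := by
  rw [addFuzzy, if_pos h]; rfl

theorem addFuzzy_nonpos (keyword : String) (d : Int) (h : ¬ d > 0) :
    addFuzzy keyword d = PySem.Set.ofList [keyword] := by
  rw [addFuzzy, if_neg h]

theorem fuzzLoop_pos (keyword : String) (d : Int) (cur : PySem.Set String) (h : d > 0) :
    fuzzLoop keyword d cur = fuzzLoop keyword (d - 1) (fuzzEdits keyword cur) := by
  rw [fuzzLoop, if_pos h]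

theorem fuzzLoop_nonpos (keyword : String) (d : Int) (cur : PySem.Set String) (h : ¬ d > 0) :
    fuzzLoop keyword d cur = cur := by
  rw [fuzzLoop, if_neg h]

-- the loop commutes with one pass (it just applies the pass d.toNat times)
theorem fuzzLoop_comm (keyword : String) (n : Nat) :
    ∀ (d : Int), d.toNat = n → ∀ (cur : PySem.Set String),
      fuzzLoop keyword d (fuzzEdits keyword cur) = fuzzEdits keyword (fuzzLoop keyword d cur) := by
  induction n with
  | zero =>
    intro d hd cur
    have h : ¬ d > 0 := by omega
    rw [fuzzLoop_nonpos _ _ _ h, fuzzLoop_nonpos _ _ _ h]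
  | succ m ih =>
    intro d hd cur
    have h : d > 0 := by omega
    rw [fuzzLoop_pos _ _ _ h, fuzzLoop_pos _ _ _ h,
        ih (d - 1) (by omega) (fuzzEdits keyword cur)]

theorem addFuzzy_eq_alt (keyword : String) (n : Nat) :
    ∀ (d : Int), d.toNat = n → addFuzzy keyword d = addFuzzy_alt keyword d := by
  induction n with
  | zero =>
    intro d hd
    have h : ¬ d > 0 := by omega
    rw [addFuzzy_nonpos _ _ h, addFuzzy_alt, fuzzLoop_nonpos _ _ _ h]
  | succ m ih =>
    intro d hd
    have h : d > 0 := by omega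
    rw [addFuzzy_pos _ _ h, ih (d - 1) (by omega), addFuzzy_alt, addFuzzy_alt,
        fuzzLoop_pos _ _ _ h, fuzzLoop_comm keyword m (d - 1) (by omega)]

-- ===== VERDICT (by name: the statement is the Claim_ definition above) =====
theorem addFuzzy_spec : Claim_equal_addFuzzy := by
  intro keyword d _ _
  unfold Spec_addFuzzy
  exact addFuzzy_eq_alt keyword d.toNat d rfl
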